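-- pv_equiv track=rewrite | github.com/junu-skku/ot-ns | pylibs/case_studies/mle_trickle_vicious_cycle_0413.py | paper_grid_positions
-- ===== SOURCE A (Python) =====
-- import math
-- from typing import Dict, Iterable, List, Optional, Sequence, Set, Tuple
--
-- def paper_grid_positions(count: int, spacing: int, origin_x: int, origin_y: int) -> List[Tuple[int, int]]:
--     cols = max(1, int(math.ceil(math.sqrt(count))))
--     positions: List[Tuple[int, int]] = []
--     for idx in range(count):
--         row = idx // cols
--         col = idx % cols
--         positions.append((origin_x + col * spacing, origin_y + row * spacing))
--     return positions
-- ===== SOURCE B (Python) =====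
-- import math
--
-- def paper_grid_positions(count, spacing, origin_x, origin_y):
--     if count <= 0:
--         return []
--     cols = max(1, math.isqrt(count - 1) + 1)
--     full_rows = count // cols
--     rem = count % cols
--     positions = []
--     for row in range(full_rows):
--         y = origin_y + row * spacing
--         positions.extend((origin_x + c * spacing, y) for c in range(cols))
--     if rem:
--         y = origin_y + full_rows * spacing
--         positions.extend((origin_x + c * spacing, y) for c in range(rem))
--     return positions
-- ===== Notes on version B (the rewrite author's own statement) =====
-- stated objective: alternative
-- what changed: Replaces the flat per-index divmod loop with a two-level row decomposition: count//cols full rows are emitted row by row and a partial last row of count%cols cells is appended, so no per-element division is done (one divmod total); cols is computed with integer math.isqrt instead of float math.sqrt/ceil.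
import Mathlib
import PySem

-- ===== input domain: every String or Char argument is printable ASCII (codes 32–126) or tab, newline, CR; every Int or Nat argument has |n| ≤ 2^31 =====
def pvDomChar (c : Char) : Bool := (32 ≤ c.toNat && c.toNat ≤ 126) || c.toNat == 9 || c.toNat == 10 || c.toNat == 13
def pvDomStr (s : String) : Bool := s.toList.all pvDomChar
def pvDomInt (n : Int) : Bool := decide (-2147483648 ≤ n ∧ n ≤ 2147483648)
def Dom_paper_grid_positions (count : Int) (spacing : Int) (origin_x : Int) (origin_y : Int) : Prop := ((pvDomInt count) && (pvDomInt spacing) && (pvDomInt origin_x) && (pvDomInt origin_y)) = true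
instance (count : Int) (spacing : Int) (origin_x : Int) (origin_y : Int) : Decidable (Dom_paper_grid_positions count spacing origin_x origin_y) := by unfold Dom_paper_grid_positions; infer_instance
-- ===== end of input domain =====

-- B replaces A's flat per-index divmod loop by a row-by-row decomposition (full rows, then a
-- partial last row) and computes cols with an integer ceiling square root; same asymptotic cost, no speed claim.

-- ===== PORT A =====
-- int(math.ceil(math.sqrt(n))) for 0 ≤ n ≤ 2^31: exact, since for these n the correctly rounded
-- double sqrt never crosses an integer boundary (gap to the nearest integer ≥ ~1/(2·46341) ≫ ulp).
def pvCeilSqrtA (n : Int) : Int :=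
  let r := Nat.sqrt n.toNat
  if r * r = n.toNat then (r : Int) else ((r : Int) + 1)

def paper_grid_positions (count : Int) (spacing : Int) (origin_x : Int) (origin_y : Int) : List (Int × Int) :=
  let cols := max 1 (pvCeilSqrtA count)
  (PySem.List.pyRange 0 count 1).foldl (fun positions idx =>
    let row := PySem.Int.floordiv idx cols
    let col := PySem.Int.mod idx cols
    positions ++ [(origin_x + col * spacing, origin_y + row * spacing)]) []

-- ===== PORT B =====
-- one row of the grid: (origin_x + c*spacing, y) for c in range(n)
def pvRowB (n : Int) (spacing : Int) (origin_x : Int) (y : Int) : List (Int × Int) :=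
  (PySem.List.pyRange 0 n 1).map (fun c => (origin_x + c * spacing, y))

def paper_grid_positions_alt (count : Int) (spacing : Int) (origin_x : Int) (origin_y : Int) : List (Int × Int) :=
  if count ≤ 0 then []
  else
    let cols := max 1 ((Nat.sqrt (count - 1).toNat : Int) + 1)  -- math.isqrt(count-1)+1
    let full_rows := PySem.Int.floordiv count cols
    let rem := PySem.Int.mod count cols
    let positions := (PySem.List.pyRange 0 full_rows 1).foldl
      (fun positions row => positions ++ pvRowB cols spacing origin_x (origin_y + row * spacing)) []
    if rem ≠ 0 then positions ++ pvRowB rem spacing origin_x (origin_y + full_rows * spacing)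
    else positions

-- ===== PRECONDITION & SPEC =====
-- Pre_ excludes count < 0, on which A raises ValueError (math.sqrt of a negative number).
def Pre_paper_grid_positions (count : Int) (spacing : Int) (origin_x : Int) (origin_y : Int) : Prop := 0 ≤ count
instance (count : Int) (spacing : Int) (origin_x : Int) (origin_y : Int) : Decidable (Pre_paper_grid_positions count spacing origin_x origin_y) := by unfold Pre_paper_grid_positions; infer_instance
def pvWitness_paper_grid_positions : Int × Int × Int × Int := (5, 10, 0, 0)

def Spec_paper_grid_positions (count : Int) (spacing : Int) (origin_x : Int) (origin_y : Int) (out : List (Int × Int)) : Prop := out = paper_grid_positions_alt count spacing origin_x origin_y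
instance (count : Int) (spacing : Int) (origin_x : Int) (origin_y : Int) (out : List (Int × Int)) : Decidable (Spec_paper_grid_positions count spacing origin_x origin_y out) := by unfold Spec_paper_grid_positions; infer_instance

-- ===== CLAIM (what is proved, stated in full; the proofs are below) =====
def Claim_equal_paper_grid_positions : Prop := ∀ (count : Int) (spacing : Int) (origin_x : Int) (origin_y : Int), Dom_paper_grid_positions count spacing origin_x origin_y → Pre_paper_grid_positions count spacing origin_x origin_y → Spec_paper_grid_positions count spacing origin_x origin_y (paper_grid_positions count spacing origin_x origin_y)
-- ===== LEMMAS AND PROOFS =====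

-- ceiling square root: for 1 ≤ n, ceil(sqrt n) = sqrt(n-1) + 1
theorem pv_ceilSqrt_eq (n : Nat) (h : 1 ≤ n) :
    (if Nat.sqrt n * Nat.sqrt n = n then (Nat.sqrt n : Int) else ((Nat.sqrt n : Int) + 1))
      = ((Nat.sqrt (n - 1) : Int) + 1) := by
  obtain ⟨m, rfl⟩ : ∃ m, n = m + 1 := ⟨n - 1, by omega⟩
  simp only [Nat.add_sub_cancel]
  split
  · rename_i he
    have hr1 : 1 ≤ Nat.sqrt (m + 1) := by
      rcases Nat.eq_zero_or_pos (Nat.sqrt (m + 1)) with h0 | h0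
      · rw [h0] at he; omega
      · exact h0
    obtain ⟨t, ht⟩ : ∃ t, Nat.sqrt (m + 1) = t + 1 := ⟨Nat.sqrt (m + 1) - 1, by omega⟩
    rw [ht] at he
    have hm : t * t + 2 * t = m := by nlinarith
    have hlow : t ≤ Nat.sqrt m := Nat.le_sqrt'.mpr (by nlinarith)
    have hhigh : Nat.sqrt m < t + 1 := Nat.sqrt_lt'.mpr (by nlinarith)
    have hs : Nat.sqrt m = t := by omega
    rw [ht, hs]; push_cast; ring
  · rename_i he
    have h1 := Nat.sqrt_le' (m + 1)
    have hp : Nat.sqrt (m + 1) ^ 2 = Nat.sqrt (m + 1) * Nat.sqrt (m + 1) := pow_two _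
    have hle : Nat.sqrt (m + 1) ^ 2 ≤ m := by omega
    have hlow : Nat.sqrt (m + 1) ≤ Nat.sqrt m := Nat.le_sqrt'.mpr hle
    have hmono : Nat.sqrt m ≤ Nat.sqrt (m + 1) := Nat.sqrt_le_sqrt (by omega)
    have hs : Nat.sqrt m = Nat.sqrt (m + 1) := by omega
    rw [hs]

theorem pv_divmod_cell (cols : Nat) (hc : 0 < cols) (q c : Nat) (hlt : c < cols) :
    (q * cols + c) % cols = c ∧ (q * cols + c) / cols = q := by
  constructor
  · rw [mul_comm, Nat.mul_add_mod]; exact Nat.mod_eq_of_lt hlt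
  · rw [mul_comm, Nat.mul_add_div hc, Nat.div_eq_of_lt hlt, Nat.add_zero]

-- the map of A's per-index cell over a contiguous block of q full rows is the flatMap of rows
theorem pv_rows_block (cols : Nat) (hc : 0 < cols) (s ox oy : Int) (q : Nat) :
    (List.range (q * cols)).map
        (fun i : Nat => (ox + ((i % cols : Nat) : Int) * s, oy + ((i / cols : Nat) : Int) * s))
      = (List.range q).flatMap
          (fun row : Nat => (List.range cols).map (fun c : Nat => (ox + (c : Int) * s, oy + (row : Int) * s))) := by
  induction q with
  | zero => simp
  | succ q ih =>
    rw [Nat.succ_mul, List.range_add, List.map_append, ih, List.range_succ, List.flatMap_append]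
    congr 1
    simp only [List.flatMap_cons, List.flatMap_nil, List.append_nil, List.map_map]
    apply List.map_congr_left
    intro c hc'
    simp only [List.mem_range] at hc'
    obtain ⟨h1, h2⟩ := pv_divmod_cell cols hc q c hc'
    simp [Function.comp, h1, h2]

-- the tail block of r ≤ cols cells is a partial row q
theorem pv_tail_block (cols : Nat) (hc : 0 < cols) (s ox oy : Int) (q r : Nat) (hr : r ≤ cols) :
    ((List.range r).map (fun c => q * cols + c)).map
        (fun i : Nat => (ox + ((i % cols : Nat) : Int) * s, oy + ((i / cols : Nat) : Int) * s))
      = (List.range r).map (fun c : Nat => (ox + (c : Int) * s, oy + (q : Int) * s)) := by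
  rw [List.map_map]
  apply List.map_congr_left
  intro c hc'
  simp only [List.mem_range] at hc'
  obtain ⟨h1, h2⟩ := pv_divmod_cell cols hc q c (by omega)
  simp [Function.comp, h1, h2]

-- B's inner comprehension as a map over Nat range
theorem pv_rowB_eq (n : Nat) (s ox y : Int) :
    pvRowB (n : Int) s ox y = (List.range n).map (fun c : Nat => (ox + (c : Int) * s, y)) := by
  unfold pvRowB
  rw [PySem.List.pyRange_one]
  have ht : ((n : Int) - 0).toNat = n := by omega
  rw [ht, List.map_map]
  apply List.map_congr_left
  intro c _
  simp [Function.comp]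

theorem paper_grid_positions_spec : Claim_equal_paper_grid_positions := by
  intro count s ox oy hdom hpre
  unfold Spec_paper_grid_positions
  unfold Pre_paper_grid_positions at hpre
  rcases eq_or_lt_of_le hpre with h0 | hposc
  · -- count = 0
    simp [paper_grid_positions, paper_grid_positions_alt, ← h0,
      PySem.List.pyRange_one_eq_nil (by omega : (0:Int) ≤ 0)]
  · -- count > 0
    obtain ⟨n, rfl⟩ : ∃ n : Nat, count = (n : Int) := ⟨count.toNat, by omega⟩
    have hn : 1 ≤ n := by exact_mod_cast hposc
    set colsN : Nat := Nat.sqrt (n - 1) + 1 with hcolsN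
    have hAcols : max 1 (pvCeilSqrtA (n : Int)) = (colsN : Int) := by
      unfold pvCeilSqrtA
      have ht : ((n : Int)).toNat = n := Int.toNat_natCast n
      simp only [ht]
      rw [pv_ceilSqrt_eq n hn]
      have h1 : (1 : Int) ≤ (Nat.sqrt (n - 1) : Int) + 1 := by omega
      rw [max_eq_right h1, hcolsN]; push_cast; ring
    have hBcols : max 1 ((Nat.sqrt (((n : Int) - 1).toNat) : Int) + 1) = (colsN : Int) := by
      have ht : ((n : Int) - 1).toNat = n - 1 := by omega
      rw [ht]
      have h1 : (1 : Int) ≤ (Nat.sqrt (n - 1) : Int) + 1 := by omega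
      rw [max_eq_right h1, hcolsN]; push_cast; ring
    have hcpos : 0 < colsN := by omega
    set q : Nat := n / colsN with hq
    set r : Nat := n % colsN with hr
    have hnqr : n = q * colsN + r := by rw [hq, hr, mul_comm]; exact (Nat.div_add_mod n colsN).symm
    have hrlt : r < colsN := Nat.mod_lt _ hcpos
    clear_value q r colsN
    -- evaluate A
    have hA : paper_grid_positions (n : Int) s ox oy
        = (List.range n).map
            (fun i : Nat => (ox + ((i % colsN : Nat) : Int) * s, oy + ((i / colsN : Nat) : Int) * s)) := by
      unfold paper_grid_positions
      simp only [hAcols]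
      rw [PySem.List.foldl_append_singleton_eq_map, List.nil_append, PySem.List.pyRange_one]
      have ht : ((n : Int) - 0).toNat = n := by omega
      rw [ht, List.map_map]
      apply List.map_congr_left
      intro i hi
      simp only [Function.comp, zero_add]
      rw [PySem.Int.floordiv_natCast, PySem.Int.mod_natCast]
    -- evaluate B
    have hB : paper_grid_positions_alt (n : Int) s ox oy
        = (List.range q).flatMap
            (fun row : Nat => (List.range colsN).map (fun c : Nat => (ox + (c : Int) * s, oy + (row : Int) * s)))
          ++ (List.range r).map (fun c : Nat => (ox + (c : Int) * s, oy + (q : Int) * s)) := by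
      unfold paper_grid_positions_alt
      rw [if_neg (by omega)]
      simp only [hBcols, PySem.Int.floordiv_natCast, PySem.Int.mod_natCast, ← hq, ← hr]
      rw [PySem.List.foldl_append_eq_flatMap, List.nil_append, PySem.List.pyRange_one]
      have hqt : ((q : Int) - 0).toNat = q := by omega
      rw [hqt, List.flatMap_map]
      simp only [zero_add, pv_rowB_eq]
      by_cases hr0 : r = 0
      · rw [if_neg (by simp [hr0])]
        simp [hr0]
      · rw [if_pos (by exact_mod_cast hr0)]
    rw [hA, hB, hnqr, List.range_add, List.map_append]
    congr 1
    · exact pv_rows_block colsN hcpos s ox oy q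
    · exact pv_tail_block colsN hcpos s ox oy q r (by omega)
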